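-- pv_equiv track=rewrite | github.com/Andrea01111/Projet_ChatBot_Dorian_Andrea | functions2.py | token
-- ===== SOURCE A (Python) =====
-- def token(txt):
--     """
--     :param txt: takes the request : string
--     :return: return the word of the question split by " " : l
--     """
--     nw_txt = ""
--     l = []
--     #Loop to remove the capital letter and the punctuation
--     for i in txt:
--         if 65 <= ord(i) <= 90 or 192 <= ord(i) <= 223:
--             nw_txt += chr(ord(i)+32)
--         elif 97 <= ord(i) <= 122 or 224 <= ord(i) <= 255:
--             nw_txt += i
--         else:
--             nw_txt += " "
--     l_inter = nw_txt.split(" ")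
--     #Loop to delete all the non-words
--     for i in range(len(l_inter)):
--         if len(l_inter[i]) > 1:
--             l.append(l_inter[i])
--     return l
-- ===== SOURCE B (Python) =====
-- def token(txt):
--     """Single-pass tokenizer: maintains a current-word buffer and flushes it
--     at each separator (and once at the end) when it is longer than 1 char."""
--     out = []
--     buf = ""
--     for i in txt:
--         o = ord(i)
--         if 65 <= o <= 90 or 192 <= o <= 223:
--             buf += chr(o + 32)
--         elif 97 <= o <= 122 or 224 <= o <= 255:
--             buf += i
--         else:
--             if len(buf) > 1:
--                 out.append(buf)
--             buf = ""
--     if len(buf) > 1: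
--         out.append(buf)
--     return out
-- ===== Notes on version B (the rewrite author's own statement) =====
-- stated objective: simpler
-- what changed: Replaces the build-cleaned-string, split-on-space and filter pipeline with one pass that accumulates a word buffer and flushes it at separators (and once at the end) when longer than one char.
import Mathlib
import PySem

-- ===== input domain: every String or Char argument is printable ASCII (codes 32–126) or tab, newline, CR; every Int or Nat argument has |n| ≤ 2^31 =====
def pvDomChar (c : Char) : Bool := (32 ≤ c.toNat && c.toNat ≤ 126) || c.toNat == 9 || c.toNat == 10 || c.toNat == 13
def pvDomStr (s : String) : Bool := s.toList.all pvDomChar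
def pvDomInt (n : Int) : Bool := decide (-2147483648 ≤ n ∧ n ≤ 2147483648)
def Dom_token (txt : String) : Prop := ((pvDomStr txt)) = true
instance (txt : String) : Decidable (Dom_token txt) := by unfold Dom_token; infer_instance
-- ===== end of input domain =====

-- ===== PORT A =====
-- B builds a single-pass tokenizer instead of A's clean/split/filter pipeline; same return value (proved below for all inputs).
-- the per-char cleaning of A's first loop: uppercase ranges get +32, lowercase ranges kept, everything else becomes ' '
def tokenClean (c : Char) : Char :=
  if (65 ≤ c.toNat ∧ c.toNat ≤ 90) ∨ (192 ≤ c.toNat ∧ c.toNat ≤ 223) then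
    Char.ofNat (c.toNat + 32)
  else if (97 ≤ c.toNat ∧ c.toNat ≤ 122) ∨ (224 ≤ c.toNat ∧ c.toNat ≤ 255) then
    c
  else ' '

def token (txt : String) : List String :=
  -- first loop: nw_txt += <cleaned char>
  let nw_txt : List Char := txt.toList.foldl (fun acc c => acc ++ [tokenClean c]) []
  -- l_inter = nw_txt.split(" ")
  let l_inter : List (List Char) := PySem.Chars.splitOn nw_txt [' ']
  -- second loop: for i in range(len(l_inter)): if len(l_inter[i]) > 1: l.append(l_inter[i])
  let l : List (List Char) := l_inter.foldl (fun acc t => if 1 < t.length then acc ++ [t] else acc) []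
  l.map String.ofList

-- ===== PORT B =====
-- state: (current word buffer, output so far); a separator flushes the buffer when len > 1
def tokenAltStep (s : List Char × List (List Char)) (c : Char) : List Char × List (List Char) :=
  if (65 ≤ c.toNat ∧ c.toNat ≤ 90) ∨ (192 ≤ c.toNat ∧ c.toNat ≤ 223) then
    (s.1 ++ [Char.ofNat (c.toNat + 32)], s.2)
  else if (97 ≤ c.toNat ∧ c.toNat ≤ 122) ∨ (224 ≤ c.toNat ∧ c.toNat ≤ 255) then
    (s.1 ++ [c], s.2)
  else
    ([], if 1 < s.1.length then s.2 ++ [s.1] else s.2)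

def token_alt (txt : String) : List String :=
  let s := txt.toList.foldl tokenAltStep ([], [])
  -- final flush of the pending buffer
  (if 1 < s.1.length then s.2 ++ [s.1] else s.2).map String.ofList

-- ===== PRECONDITION & SPEC =====
def Spec_token (txt : String) (out : List String) : Prop := out = token_alt txt
instance (txt : String) (out : List String) : Decidable (Spec_token txt out) := by unfold Spec_token; infer_instance

-- ===== CLAIM (what is proved, stated in full; the proofs are below) =====
def Claim_equal_token : Prop := ∀ (txt : String), Dom_token txt → Spec_token txt (token txt)

-- ===== LEMMAS AND PROOFS =====

-- a simple recursive single-space splitter, used only in the proofs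
def spl : List Char → List (List Char)
  | [] => [[]]
  | c :: rest =>
      if c = ' ' then [] :: spl rest
      else match spl rest with
        | t :: ts => (c :: t) :: ts
        | [] => [[c]]

-- prefix the first piece with a pending buffer
def consPref (p : List Char) : List (List Char) → List (List Char)
  | t :: ts => (p ++ t) :: ts
  | [] => [p]

theorem spl_ne_nil (l : List Char) : spl l ≠ [] := by
  cases l with
  | nil => simp [spl]
  | cons c rest =>
    simp only [spl]
    split
    · simp
    · split <;> simp

theorem consPref_consPref (p q : List Char) (ll : List (List Char)) (h : ll ≠ []) :
    consPref p (consPref q ll) = consPref (p ++ q) ll := by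
  cases ll with
  | nil => exact absurd rfl h
  | cons t ts => simp [consPref]

theorem spl_cons_of_ne (c : Char) (rest : List Char) (h : c ≠ ' ') :
    spl (c :: rest) = consPref [c] (spl rest) := by
  simp only [spl, if_neg h]
  cases hr : spl rest with
  | nil => exact absurd hr (spl_ne_nil rest)
  | cons t ts => simp [consPref]

theorem splitOn_go_eq_spl (l : List Char) : ∀ (fuel : Nat) (cur : List Char)
    (acc : List (List Char)), l.length ≤ fuel →
    PySem.Chars.splitOn.go [' '] fuel l cur acc
      = acc.reverse ++ consPref cur.reverse (spl l) := by
  induction l with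
  | nil =>
    intro fuel cur acc _
    cases fuel <;> simp [PySem.Chars.splitOn.go, spl, consPref]
  | cons c rest ih =>
    intro fuel cur acc hf
    cases fuel with
    | zero => simp at hf
    | succ f =>
      simp only [List.length_cons, Nat.add_le_add_iff_right] at hf
      by_cases hc : c = ' '
      · subst hc
        have : PySem.Chars.splitOn.go [' '] (f + 1) (' ' :: rest) cur acc
            = PySem.Chars.splitOn.go [' '] f rest [] (cur.reverse :: acc) := by
          simp [PySem.Chars.splitOn.go, List.isPrefixOf]
        rw [this, ih f [] (cur.reverse :: acc) hf]
        simp [spl, consPref]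
        cases hr : spl rest with
        | nil => exact absurd hr (spl_ne_nil rest)
        | cons t ts => simp
      · have : PySem.Chars.splitOn.go [' '] (f + 1) (c :: rest) cur acc
            = PySem.Chars.splitOn.go [' '] f rest (c :: cur) acc := by
          simp [PySem.Chars.splitOn.go, List.isPrefixOf, (Ne.symm hc)]
        rw [this, ih f (c :: cur) acc hf, spl_cons_of_ne c rest hc,
          consPref_consPref _ _ _ (spl_ne_nil rest)]
        simp
theorem splitOn_eq_spl (l : List Char) : PySem.Chars.splitOn l [' '] = spl l := by
  rw [PySem.Chars.splitOn, splitOn_go_eq_spl l (l.length + 1) [] [] (by omega)]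
  cases hr : spl l with
  | nil => exact absurd hr (spl_ne_nil l)
  | cons t ts => simp [consPref]

-- the cleaned char of a word-class char is never the separator
theorem tokenClean_ne_space_of_upper (c : Char)
    (h : (65 ≤ c.toNat ∧ c.toNat ≤ 90) ∨ (192 ≤ c.toNat ∧ c.toNat ≤ 223)) :
    Char.ofNat (c.toNat + 32) ≠ ' ' := by
  intro heq
  have hv : (c.toNat + 32).isValidChar := by
    constructor
    omega
  have := congrArg Char.toNat heq
  have hval : (Char.ofNat (c.toNat + 32)).toNat = c.toNat + 32 := by
    unfold Char.ofNat
    rw [dif_pos ?_]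
    · rfl
    · exact hv
  rw [hval] at this
  have hsp : (' ' : Char).toNat = 32 := by decide
  omega

theorem filter_singleton_len (b : List Char) :
    List.filter (fun t => decide (1 < t.length)) [b]
      = if 1 < b.length then [b] else [] := by
  by_cases h : 1 < b.length <;> simp [List.filter, h]

-- main invariant for B's single pass
theorem tokenAlt_invariant (l : List Char) : ∀ (buf : List Char) (acc : List (List Char)),
    (let s := l.foldl tokenAltStep (buf, acc);
      if 1 < s.1.length then s.2 ++ [s.1] else s.2)
      = acc ++ List.filter (fun t => decide (1 < t.length)) (consPref buf (spl (l.map tokenClean))) := by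
  induction l with
  | nil =>
    intro buf acc
    simp [spl, consPref, filter_singleton_len]
    by_cases h : 1 < buf.length <;> simp [h]
  | cons c rest ih =>
    intro buf acc
    by_cases h1 : (65 ≤ c.toNat ∧ c.toNat ≤ 90) ∨ (192 ≤ c.toNat ∧ c.toNat ≤ 223)
    · have hstep : tokenAltStep (buf, acc) c = (buf ++ [Char.ofNat (c.toNat + 32)], acc) := by
        simp [tokenAltStep, h1]
      have hclean : tokenClean c = Char.ofNat (c.toNat + 32) := by simp [tokenClean, h1]
      simp only [List.foldl_cons, hstep]
      rw [ih (buf ++ [Char.ofNat (c.toNat + 32)]) acc]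
      simp only [List.map_cons, hclean,
        spl_cons_of_ne _ _ (tokenClean_ne_space_of_upper c h1),
        consPref_consPref _ _ _ (spl_ne_nil _)]
    · by_cases h2 : (97 ≤ c.toNat ∧ c.toNat ≤ 122) ∨ (224 ≤ c.toNat ∧ c.toNat ≤ 255)
      · have hstep : tokenAltStep (buf, acc) c = (buf ++ [c], acc) := by
          simp [tokenAltStep, h1, h2]
        have hclean : tokenClean c = c := by simp [tokenClean, h1, h2]
        have hne : c ≠ ' ' := by
          intro heq; subst heq; simp [Char.toNat] at h2
        simp only [List.foldl_cons, hstep]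
        rw [ih (buf ++ [c]) acc]
        simp only [List.map_cons, hclean, spl_cons_of_ne _ _ hne,
          consPref_consPref _ _ _ (spl_ne_nil _)]
      · have hstep : tokenAltStep (buf, acc) c
            = ([], if 1 < buf.length then acc ++ [buf] else acc) := by
          simp [tokenAltStep, h1, h2]
        have hclean : tokenClean c = ' ' := by simp [tokenClean, h1, h2]
        simp only [List.foldl_cons, hstep]
        rw [ih [] _]
        simp only [List.map_cons, hclean, spl]
        cases hr : spl (rest.map tokenClean) with
        | nil => exact absurd hr (spl_ne_nil _)
        | cons t ts =>
          simp only [consPref, List.nil_append, List.filter_cons]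
          by_cases hb : 1 < buf.length
          · simp [hb, List.filter_cons, List.append_assoc]
          · simp [hb, List.filter_cons]

-- A's first loop builds the cleaned character list
theorem token_nw_eq_map (l : List Char) :
    l.foldl (fun acc c => acc ++ [tokenClean c]) [] = l.map tokenClean := by
  simpa using PySem.List.foldl_append_singleton_eq_map tokenClean l []

-- A's second loop is a filter
theorem token_filter_loop (ll : List (List Char)) :
    ll.foldl (fun acc t => if 1 < t.length then acc ++ [t] else acc) []
      = List.filter (fun t => decide (1 < t.length)) ll := by
  induction ll using List.reverseRecOn with
  | nil => simp
  | append_singleton ts t ih =>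
    simp only [List.foldl_append, List.foldl_cons, List.foldl_nil, ih,
      List.filter_append, filter_singleton_len]
    by_cases h : 1 < t.length <;> simp [h]

-- ===== VERDICT (by name: the statement is the Claim_ definition above) =====
theorem token_spec : Claim_equal_token := by
  intro txt _
  unfold Spec_token token token_alt
  simp only [token_nw_eq_map, splitOn_eq_spl, token_filter_loop]
  have := tokenAlt_invariant txt.toList [] []
  simp only at this
  rw [this]
  cases hr : spl (txt.toList.map tokenClean) with
  | nil => exact absurd hr (spl_ne_nil _)
  | cons t ts => simp [consPref]
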